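-- pv_equiv track=rewrite | github.com/leechanhoe/study-algorithm | src/backjoon/silver/silver3/bj3085.py | check_max
-- ===== SOURCE A (Python) =====
-- def check_max(arr, n):
--     max_cnt = 0
--     for i in range(n):
--         row_cnt = 1
--         for j in range(n - 1):
--             if arr[i][j] == arr[i][j+1]:
--                 row_cnt += 1
--                 max_cnt = max(max_cnt, row_cnt)
--             else :
--                 row_cnt = 1
--
--     for i in range(n):
--         col_cnt = 1
--         for j in range(n - 1):
--             if arr[j][i] == arr[j+1][i]:
--                 col_cnt += 1
--                 max_cnt = max(max_cnt, col_cnt)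
--             else :
--                 col_cnt = 1
--
--     return max_cnt
-- ===== SOURCE B (Python) =====
-- def check_max(arr, n):
--     if n <= 0:
--         return 0
--     rows = [row[:n] for row in arr[:n]]
--     cols = [list(c) for c in zip(*rows)]
--     best = 0
--     for line in rows + cols:
--         while line:
--             k = 1
--             while k < len(line) and line[k] == line[0]:
--                 k += 1
--             if k > best:
--                 best = k
--             line = line[k:]
--     return best if best >= 2 else 0
-- ===== Notes on version B (the rewrite author's own statement) =====
-- stated objective: alternative
-- what changed: Replaces A's two index-loop passes with threaded running counters by truncating the grid to n x n, segmenting each row and each zip(*rows) column into maximal runs, and returning the longest run length if it is at least 2.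
import Mathlib
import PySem

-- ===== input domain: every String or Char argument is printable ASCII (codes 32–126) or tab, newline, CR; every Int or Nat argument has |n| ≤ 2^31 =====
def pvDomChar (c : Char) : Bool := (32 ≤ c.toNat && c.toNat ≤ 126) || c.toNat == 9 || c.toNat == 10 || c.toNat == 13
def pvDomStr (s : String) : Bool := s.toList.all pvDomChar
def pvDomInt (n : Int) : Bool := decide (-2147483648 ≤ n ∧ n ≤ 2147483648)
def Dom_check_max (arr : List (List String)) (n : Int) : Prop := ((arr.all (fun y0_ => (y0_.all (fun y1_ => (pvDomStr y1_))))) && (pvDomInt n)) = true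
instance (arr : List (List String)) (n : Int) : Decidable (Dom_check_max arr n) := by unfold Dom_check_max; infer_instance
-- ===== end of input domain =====

-- B replaces A's threaded running counters over index pairs by truncating the grid,
-- segmenting each row and each column (via zip(*rows)) into maximal runs, and
-- returning the longest run length if it is at least 2 (objective: alternative).

-- ===== PORT A =====
-- arr[i][j] (out of range = none, Python's IndexError)
def pvCell (arr : List (List String)) (i j : Int) : Option String :=
  (PySem.List.pyGet? arr i).bind (fun r => PySem.List.pyGet? r j)

def check_max (arr : List (List String)) (n : Int) : Int :=
  let m1 := (PySem.List.pyRange 0 n 1).foldl (fun mc i =>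
    ((PySem.List.pyRange 0 (n-1) 1).foldl (fun (p : Int × Int) j =>
      if pvCell arr i j = pvCell arr i (j+1) then (max p.1 (p.2+1), p.2+1)
      else (p.1, 1)) (mc, 1)).1) 0
  let m2 := (PySem.List.pyRange 0 n 1).foldl (fun mc i =>
    ((PySem.List.pyRange 0 (n-1) 1).foldl (fun (p : Int × Int) j =>
      if pvCell arr j i = pvCell arr (j+1) i then (max p.1 (p.2+1), p.2+1)
      else (p.1, 1)) (mc, 1)).1) m1
  m2

-- ===== PORT B =====
-- inner while: number of leading elements of the list equal to x
def runPrefix (x : String) : List String → Nat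
  | [] => 0
  | y :: ys => if y = x then runPrefix x ys + 1 else 0

-- outer while over one line: length of the longest maximal run
def longestRun : List String → Nat
  | [] => 0
  | x :: ys => max (runPrefix x ys + 1) (longestRun (ys.drop (runPrefix x ys)))
termination_by l => l.length
decreasing_by simp

-- zip(*rows): columns, truncated to the shortest row
def zipStar (rows : List (List String)) : List (List String) :=
  match rows with
  | [] => []
  | r :: rs =>
    let m := (rs.map List.length).foldl min r.length
    (List.range m).map (fun i => (r :: rs).map (fun row => row.getD i ""))

def check_max_alt (arr : List (List String)) (n : Int) : Int :=
  if n ≤ 0 then 0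
  else
    -- arr[:n] / row[:n] with 0 < n is take n
    let rows := (arr.take n.toNat).map (fun row => row.take n.toNat)
    let cols := zipStar rows
    let best := (rows ++ cols).foldl (fun b line => max b ((longestRun line : Int))) 0
    if 2 ≤ best then best else 0

-- ===== PRECONDITION & SPEC =====
-- Pre_ excludes exactly the inputs on which A raises IndexError: for n ≥ 2, A reads
-- arr[i][j] for all i, j < n, so the first n rows must exist and have length ≥ n
-- (for n ≤ 1 A indexes nothing and returns 0).
def Pre_check_max (arr : List (List String)) (n : Int) : Prop :=
  2 ≤ n → (n ≤ (arr.length : Int) ∧ ∀ row ∈ arr.take n.toNat, n ≤ (row.length : Int))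
instance (arr : List (List String)) (n : Int) : Decidable (Pre_check_max arr n) := by
  unfold Pre_check_max; infer_instance

def pvWitness_check_max : List (List String) × Int := ([["a","a"],["b","a"]], 2)

def Spec_check_max (arr : List (List String)) (n : Int) (out : Int) : Prop := out = check_max_alt arr n
instance (arr : List (List String)) (n : Int) (out : Int) : Decidable (Spec_check_max arr n out) := by unfold Spec_check_max; infer_instance

-- ===== CLAIM (what is proved, stated in full; the proofs are below) =====
def Claim_equal_check_max : Prop := ∀ (arr : List (List String)) (n : Int), Dom_check_max arr n → Pre_check_max arr n → Spec_check_max arr n (check_max arr n)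

-- ===== LEMMAS AND PROOFS =====

def thr (k : Int) : Int := if 2 ≤ k then k else 0
def pairStep (p : Int × Int) (q : String × String) : Int × Int :=
  if q.1 = q.2 then (max p.1 (p.2+1), p.2+1) else (p.1, 1)
def bw (cnt : Int) (x : String) (xs : List String) : Int :=
  max (if 1 ≤ (runPrefix x xs : Int) then cnt + runPrefix x xs else 0)
      (thr (longestRun (xs.drop (runPrefix x xs))))

theorem runPrefix_le_length (x : String) (l : List String) : runPrefix x l ≤ l.length := by
  induction l with
  | nil => simp [runPrefix]
  | cons y ys ih => simp only [runPrefix]; split <;> simp; omega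

theorem longestRun_le_length : ∀ l : List String, longestRun l ≤ l.length := by
  intro l
  induction l using longestRun.induct with
  | case1 => rw [longestRun.eq_def]; simp
  | case2 x ys ih =>
    rw [longestRun.eq_def]
    simp only [max_le_iff, List.length_cons]
    constructor
    · have := runPrefix_le_length x ys; omega
    · refine le_trans ih ?_; simp; omega

theorem thr_nonneg (k : Int) : 0 ≤ thr k := by unfold thr; split <;> omega

theorem thr_max (a b : Int) : thr (max a b) = max (thr a) (thr b) := by
  unfold thr; rcases le_total a b with h | h <;> split_ifs <;> omega

theorem bw_one (y : String) (ys : List String) :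
    bw 1 y ys = thr (longestRun (y :: ys)) := by
  rw [longestRun.eq_def]
  unfold bw
  rw [Nat.cast_max, thr_max]
  congr 1
  unfold thr
  rcases Nat.eq_zero_or_pos (runPrefix y ys) with h | h
  · simp [h]
  · push_cast
    split_ifs <;> omega

theorem core_counter : ∀ (xs : List String) (x : String) (mx cnt : Int), 0 ≤ mx → 1 ≤ cnt →
    (((x :: xs).zip xs).foldl pairStep (mx, cnt)).1 = max mx (bw cnt x xs) := by
  intro xs
  induction xs with
  | nil =>
    intro x mx cnt h0 h1
    have h : longestRun [] = 0 := by rw [longestRun.eq_def]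
    simp [bw, runPrefix, thr, h]
    omega
  | cons y ys ih =>
    intro x mx cnt h0 h1
    by_cases hxy : x = y
    · subst hxy
      simp only [List.zip_cons_cons, List.foldl_cons, pairStep]
      norm_num
      rw [ih x (max mx (cnt+1)) (cnt+1) (by omega) (by omega)]
      unfold bw
      have hrp : runPrefix x (x :: ys) = runPrefix x ys + 1 := by simp [runPrefix]
      rw [hrp]
      simp only [List.drop_succ_cons]
      have hT := thr_nonneg ((longestRun (ys.drop (runPrefix x ys)) : Nat) : Int)
      push_cast
      rcases Nat.eq_zero_or_pos (runPrefix x ys) with h | h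
      · have hk : ((runPrefix x ys : Nat) : Int) = 0 := by exact_mod_cast h
        rw [hk]
        norm_num
        omega
      · have hk : (1:Int) ≤ ((runPrefix x ys : Nat) : Int) := by exact_mod_cast h
        rw [if_pos hk, if_pos (by omega)]
        omega
    · simp only [List.zip_cons_cons, List.foldl_cons, pairStep, if_neg hxy]
      rw [ih y mx 1 h0 (by omega)]
      rw [bw_one]
      conv_rhs => unfold bw
      simp only [runPrefix, if_neg (Ne.symm hxy)]
      have hT := thr_nonneg ((longestRun (y :: ys) : Nat) : Int)
      simp only [Nat.cast_zero, List.drop_zero]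
      rw [if_neg (by omega)]
      omega

theorem line_lemma (line : List String) (hne : line ≠ []) (mx : Int) (h0 : 0 ≤ mx) :
    ((line.zip line.tail).foldl pairStep (mx, 1)).1 = max mx (thr (longestRun line)) := by
  cases line with
  | nil => simp at hne
  | cons x xs =>
    simp only [List.tail_cons]
    rw [core_counter xs x mx 1 h0 le_rfl, bw_one]

theorem idx_to_zip : ∀ (line : List String) (g : Nat → Option String) (p0 : Int × Int),
    (∀ j, j < line.length → g j = some (line.getD j "")) →
    (List.range (line.length - 1)).foldl
      (fun p j => if g j = g (j+1) then (max p.1 (p.2+1), p.2+1) else (p.1, 1)) p0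
    = (line.zip line.tail).foldl pairStep p0 := by
  intro line
  induction line with
  | nil => intro g p0 h; simp
  | cons x t ih =>
    cases t with
    | nil => intro g p0 h; simp
    | cons y r =>
      intro g p0 h
      have hx : g 0 = some x := by simpa using h 0 (by simp)
      have hy : g 1 = some y := by simpa using h 1 (by simp)
      simp only [List.length_cons, Nat.add_sub_cancel, List.range_succ_eq_map,
        List.foldl_cons, List.foldl_map, List.zip_cons_cons, List.tail_cons]
      rw [hx, hy]
      have step1 : (if some x = some y then (max p0.1 (p0.2+1), p0.2+1) else (p0.1, 1))
          = pairStep p0 (x, y) := by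
        simp [pairStep]
      rw [step1]
      have := ih (fun j => g (j+1)) (pairStep p0 (x, y))
        (by intro j hj; simpa [List.getD_cons_succ] using h (j+1) (by simpa using hj))
      simp only [List.length_cons, Nat.add_sub_cancel, List.tail_cons] at this
      rw [← this]

theorem foldl_eq_of_inv {α : Type} : ∀ (l : List α) (F : Int → α → Int) (G : α → Int) (b : Int),
    0 ≤ b → (∀ mc k, 0 ≤ mc → k ∈ l → F mc k = max mc (G k)) →
    l.foldl F b = l.foldl (fun mc k => max mc (G k)) b := by
  intro l
  induction l with
  | nil => intro F G b hb h; rfl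
  | cons k t ih =>
    intro F G b hb h
    simp only [List.foldl_cons]
    rw [h b k hb (by simp)]
    exact ih F G _ (le_trans hb (le_max_left _ _)) (fun mc k' hmc hk' => h mc k' hmc (by simp [hk']))

theorem le_foldl_max {α : Type} : ∀ (l : List α) (f : α → Int) (b : Int),
    b ≤ l.foldl (fun mc k => max mc (f k)) b := by
  intro l
  induction l with
  | nil => intro f b; simp
  | cons k t ih =>
    intro f b
    simp only [List.foldl_cons]
    exact le_trans (le_max_left _ _) (ih f _)

theorem fold_thr : ∀ (ls : List (List String)) (b : Int), 0 ≤ b →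
    ls.foldl (fun mx l => max mx (thr (longestRun l))) (thr b)
    = thr (ls.foldl (fun mx l => max mx ((longestRun l : Int))) b) := by
  intro ls
  induction ls with
  | nil => intro b hb; rfl
  | cons l t ih =>
    intro b hb
    simp only [List.foldl_cons]
    rw [← thr_max, ih (max b (longestRun l)) (le_trans hb (le_max_left _ _))]

theorem range_getD_foldl {α : Type} : ∀ (l : List α) (f : Int → α → Int) (b : Int) (d : α),
    (List.range l.length).foldl (fun mc k => f mc (l.getD k d)) b = l.foldl f b := by
  intro l
  induction l with
  | nil => intro f b d; rfl
  | cons x t ih =>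
    intro f b d
    simp only [List.length_cons, List.range_succ_eq_map, List.foldl_cons, List.foldl_map,
      List.getD_cons_zero, List.getD_cons_succ]
    exact ih f (f b x) d

theorem foldl_min_const : ∀ (l : List Nat) (c : Nat), (∀ v ∈ l, v = c) → l.foldl min c = c := by
  intro l
  induction l with
  | nil => intro c h; rfl
  | cons v t ih =>
    intro c h
    simp only [List.foldl_cons]
    rw [h v (by simp), min_self]
    exact ih c (fun w hw => h w (by simp [hw]))

theorem getD_take {α : Type} (l : List α) (N j : Nat) (d : α) (hj : j < N) (hN : N ≤ l.length) :
    (l.take N).getD j d = l.getD j d := by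
  rw [List.getD_eq_getElem _ _ (by simp; omega), List.getD_eq_getElem _ _ (by omega)]
  simp

theorem zipStar_eq (rows : List (List String)) (N : Nat) (hne : rows ≠ [])
    (hlen : ∀ row ∈ rows, row.length = N) :
    zipStar rows = (List.range N).map (fun i => rows.map (fun row => row.getD i "")) := by
  cases rows with
  | nil => simp at hne
  | cons r rs =>
    show (List.range ((rs.map List.length).foldl min r.length)).map _ = _
    have h1 : r.length = N := hlen r (by simp)
    have h2 : (rs.map List.length).foldl min r.length = N := by
      rw [h1]
      refine foldl_min_const _ N ?_
      intro v hv
      simp only [List.mem_map] at hv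
      obtain ⟨row, hrow, rfl⟩ := hv
      exact hlen row (by simp [hrow])
    rw [h2]

theorem zipStar_mem_length (rows : List (List String)) (l : List String) (hl : l ∈ zipStar rows) :
    l.length = rows.length := by
  cases rows with
  | nil => simp [zipStar] at hl
  | cons r rs =>
    simp only [zipStar, List.mem_map] at hl
    obtain ⟨i, _, rfl⟩ := hl
    simp

theorem fold_max_le {α : Type} : ∀ (l : List α) (f : α → Int) (b c : Int), b ≤ c →
    (∀ x ∈ l, f x ≤ c) → l.foldl (fun m x => max m (f x)) b ≤ c := by
  intro l
  induction l with
  | nil => intro f b c hb h; simpa using hb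
  | cons x t ih =>
    intro f b c hb h
    simp only [List.foldl_cons]
    exact ih f _ c (max_le hb (h x (by simp))) (fun y hy => h y (by simp [hy]))

theorem main_eq (arr : List (List String)) (n : Int) (hn : 2 ≤ n)
    (hlen : (n:Int) ≤ arr.length)
    (hrow : ∀ row ∈ arr.take n.toNat, (n:Int) ≤ row.length) :
    check_max arr n = check_max_alt arr n := by
  set N := n.toNat with hN
  have hN2 : 2 ≤ N := by omega
  have hNlen : N ≤ arr.length := by omega
  have hrow' : ∀ i, i < N → N ≤ (arr.getD i []).length := by
    intro i hi
    have hm : arr.getD i [] ∈ arr.take N := by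
      rw [List.getD_eq_getElem _ _ (by omega)]
      have : (arr.take N)[i]'(by simp; omega) = arr[i]'(by omega) := by
        simp [List.getElem_take]
      rw [← this]
      exact List.getElem_mem _
    have := hrow _ hm; omega
  set rowsB := (arr.take N).map (fun r => r.take N) with hrowsB
  have len_rowsB : rowsB.length = N := by simp [hrowsB]; omega
  have rowsB_getD : ∀ i, i < N → rowsB.getD i [] = (arr.getD i []).take N := by
    intro i hi
    rw [List.getD_eq_getElem _ _ (by omega), List.getD_eq_getElem _ _ (by omega)]
    simp [hrowsB, List.getElem_take]
  have len_elem : ∀ i, i < N → (rowsB.getD i []).length = N := by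
    intro i hi
    rw [rowsB_getD i hi]
    simp only [List.length_take]
    have := hrow' i hi; omega
  set colsB := (List.range N).map (fun i => rowsB.map (fun row => row.getD i "")) with hcolsB
  have hzip : zipStar rowsB = colsB := by
    refine zipStar_eq rowsB N (by intro h; rw [h] at len_rowsB; simp at len_rowsB; omega) ?_
    intro row hrow2
    simp only [hrowsB, List.mem_map] at hrow2
    obtain ⟨r, hr, rfl⟩ := hrow2
    have := hrow r hr
    simp only [List.length_take]
    omega
  have colsB_getD : ∀ i, i < N → colsB.getD i [] = rowsB.map (fun row => row.getD i "") := by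
    intro i hi
    rw [hcolsB, List.getD_eq_getElem _ _ (by simp; omega)]
    simp
  have cellRow : ∀ k j : Nat, k < N → j < N →
      pvCell arr (k : Int) (j : Int) = some ((rowsB.getD k []).getD j "") := by
    intro k j hk hj
    have hkl : k < arr.length := by omega
    have hgd : arr.getD k [] = arr[k] := List.getD_eq_getElem _ _ hkl
    have hNk : N ≤ arr[k].length := by have := hrow' k hk; rw [hgd] at this; omega
    have hjl : j < arr[k].length := by omega
    unfold pvCell
    rw [PySem.List.pyGet?_natCast, List.getElem?_eq_getElem hkl]
    simp only [Option.bind_some]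
    rw [PySem.List.pyGet?_natCast, List.getElem?_eq_getElem hjl]
    rw [rowsB_getD k hk, getD_take _ N j _ hj (by rw [hgd]; omega), hgd]
    rw [List.getD_eq_getElem _ _ hjl]
  have cellCol : ∀ k j : Nat, k < N → j < N →
      pvCell arr (j : Int) (k : Int) = some ((colsB.getD k []).getD j "") := by
    intro k j hk hj
    rw [cellRow j k hj hk, colsB_getD k hk]
    congr 1
    rw [List.getD_eq_getElem (rowsB.map _) _ (by simp; omega)]
    simp only [List.getElem_map]
    congr 1
    rw [List.getD_eq_getElem _ _ (by omega)]
  -- reduce A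
  simp only [check_max]
  rw [PySem.List.pyRange_one 0 n, PySem.List.pyRange_one 0 (n-1)]
  simp only [List.foldl_map, zero_add, sub_zero, ← hN]
  have hsub : (n-1).toNat = N - 1 := by omega
  rw [hsub]
  have rowstep : ∀ (mc : Int) (k : Nat), 0 ≤ mc → k ∈ List.range N →
      ((List.range (N-1)).foldl (fun (p : Int × Int) (j : Nat) =>
        if pvCell arr (k : Int) (j : Int) = pvCell arr (k : Int) ((j : Int)+1) then (max p.1 (p.2+1), p.2+1)
        else (p.1, 1)) (mc, 1)).1 = max mc (thr (longestRun (rowsB.getD k []))) := by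
    intro mc k hmc hk
    rw [List.mem_range] at hk
    have hline : (rowsB.getD k []).length = N := len_elem k hk
    have hiz := idx_to_zip (rowsB.getD k []) (fun j => pvCell arr (k : Int) (j : Int)) (mc, 1)
      (by intro j hj; exact cellRow k j hk (by omega))
    rw [hline] at hiz
    beta_reduce at hiz
    simp only [← Nat.cast_add_one]
    rw [hiz]
    rw [line_lemma _ (by intro hnil; rw [hnil] at hline; simp at hline; omega) mc hmc]
  have colstep : ∀ (mc : Int) (k : Nat), 0 ≤ mc → k ∈ List.range N →
      ((List.range (N-1)).foldl (fun (p : Int × Int) (j : Nat) =>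
        if pvCell arr (j : Int) (k : Int) = pvCell arr ((j : Int)+1) (k : Int) then (max p.1 (p.2+1), p.2+1)
        else (p.1, 1)) (mc, 1)).1 = max mc (thr (longestRun (colsB.getD k []))) := by
    intro mc k hmc hk
    rw [List.mem_range] at hk
    have hline : (colsB.getD k []).length = N := by
      rw [colsB_getD k hk]; simp [len_rowsB]
    have hiz := idx_to_zip (colsB.getD k []) (fun j => pvCell arr (j : Int) (k : Int)) (mc, 1)
      (by intro j hj; exact cellCol k j hk (by omega))
    rw [hline] at hiz
    beta_reduce at hiz
    simp only [← Nat.cast_add_one]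
    rw [hiz]
    rw [line_lemma _ (by intro hnil; rw [hnil] at hline; simp at hline; omega) mc hmc]
  rw [foldl_eq_of_inv (List.range N) _ (fun k => thr (longestRun (rowsB.getD k []))) 0 le_rfl rowstep]
  rw [foldl_eq_of_inv (List.range N) _ (fun k => thr (longestRun (colsB.getD k [])))
      _ (le_foldl_max _ _ 0) colstep]
  have hr1 := range_getD_foldl rowsB (fun mc line => max mc (thr (longestRun line))) 0 []
  have hr2 := range_getD_foldl colsB (fun mc line => max mc (thr (longestRun line)))
      (rowsB.foldl (fun mc line => max mc (thr (longestRun line))) 0) []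
  beta_reduce at hr1 hr2
  rw [len_rowsB] at hr1
  rw [show colsB.length = N from by rw [hcolsB]; simp] at hr2
  rw [hr1, hr2, ← List.foldl_append]
  -- reduce B
  simp only [check_max_alt, if_neg (show ¬ n ≤ 0 by omega), ← hN, ← hrowsB, hzip]
  have hft := fold_thr (rowsB ++ colsB) 0 le_rfl
  rw [show thr 0 = 0 from by norm_num [thr]] at hft
  rw [hft]
  simp [thr]

theorem eq_of_nonpos (arr : List (List String)) (n : Int) (hn : n ≤ 0) :
    check_max arr n = check_max_alt arr n := by
  simp [check_max, check_max_alt, PySem.List.pyRange_one_eq_nil hn, hn]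

theorem eq_of_one (arr : List (List String)) : check_max arr 1 = check_max_alt arr 1 := by
  have h1 : PySem.List.pyRange 0 1 1 = [0] := by
    have := PySem.List.pyRange_one_singleton (0:Int)
    norm_num at this
    exact this
  have hA : check_max arr 1 = 0 := by simp [check_max, h1]
  rw [hA]
  simp only [check_max_alt, if_neg (show ¬ (1:Int) ≤ 0 by norm_num), Int.toNat_one]
  set rows := (arr.take 1).map (fun row => row.take 1) with hrows
  have hlines : ∀ line ∈ rows ++ zipStar rows, ((longestRun line : Nat) : Int) ≤ 1 := by
    intro line hl
    have hlen : line.length ≤ 1 := by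
      rcases List.mem_append.1 hl with h | h
      · simp only [hrows, List.mem_map] at h
        obtain ⟨r, _, rfl⟩ := h
        simp
      · rw [zipStar_mem_length _ _ h]
        simp [hrows]
    have := longestRun_le_length line
    exact_mod_cast le_trans this hlen
  have hb := fold_max_le (rows ++ zipStar rows) (fun line => ((longestRun line : Nat) : Int))
      0 1 (by norm_num) hlines
  beta_reduce at hb
  rw [if_neg (by omega)]

-- ===== VERDICT (by name: the statement is the Claim_ definition above) =====
theorem check_max_spec : Claim_equal_check_max := by
  intro arr n _ hpre
  unfold Spec_check_max
  rcases (show n ≤ 0 ∨ 0 < n by omega) with hn | hn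
  · exact eq_of_nonpos arr n hn
  · rcases (show n < 2 ∨ 2 ≤ n by omega) with h2 | h2
    · have h1 : n = 1 := by omega
      subst h1
      exact eq_of_one arr
    · obtain ⟨hl, hr⟩ := hpre h2
      exact main_eq arr n h2 hl hr
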